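-- pv_equiv track=rewrite | github.com/Muralikrishnaraparthi/ConversationalAI_RAG_vs_RAFT_Financial_ChatBot | utils.py | select_top_paragraphs
-- ===== SOURCE A (Python) =====
-- from typing import List
--
-- def select_top_paragraphs(query: str, paragraphs: List[str], top_n: int = 3) -> List[str]:
--     query_terms = set(query.lower().split())
--     scored = []
--     for para in paragraphs:
--         para_terms = set(para.lower().split())
--         score = len(query_terms & para_terms)
--         scored.append((score, para))
--     scored.sort(key=lambda x: (-x[0], -len(x[1])))  # Prioritize match count then length
--     selected = [para for _, para in scored[:top_n]]
--     return selected
-- ===== SOURCE B (Python) =====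
-- from typing import List
--
-- def select_top_paragraphs(query: str, paragraphs: List[str], top_n: int = 3) -> List[str]:
--     # Inverted index: term -> list of indices of paragraphs containing it.
--     index = {}
--     for i, para in enumerate(paragraphs):
--         for t in set(para.lower().split()):
--             index.setdefault(t, []).append(i)
--     scores = [0] * len(paragraphs)
--     for t in set(query.lower().split()):
--         for i in index.get(t, []):
--             scores[i] += 1
--     order = sorted(range(len(paragraphs)),
--                    key=lambda i: (-scores[i], -len(paragraphs[i])))
--     return [paragraphs[i] for i in order[:top_n]]
-- ===== Notes on version B (the rewrite author's own statement) =====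
-- stated objective: alternative
-- what changed: Replaces the per-paragraph set-intersection scoring with an inverted index (term -> posting list of paragraph indices) built in one pass, a score array incremented from the query terms' posting lists, and a sort over indices instead of (score, paragraph) pairs.
import Mathlib
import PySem

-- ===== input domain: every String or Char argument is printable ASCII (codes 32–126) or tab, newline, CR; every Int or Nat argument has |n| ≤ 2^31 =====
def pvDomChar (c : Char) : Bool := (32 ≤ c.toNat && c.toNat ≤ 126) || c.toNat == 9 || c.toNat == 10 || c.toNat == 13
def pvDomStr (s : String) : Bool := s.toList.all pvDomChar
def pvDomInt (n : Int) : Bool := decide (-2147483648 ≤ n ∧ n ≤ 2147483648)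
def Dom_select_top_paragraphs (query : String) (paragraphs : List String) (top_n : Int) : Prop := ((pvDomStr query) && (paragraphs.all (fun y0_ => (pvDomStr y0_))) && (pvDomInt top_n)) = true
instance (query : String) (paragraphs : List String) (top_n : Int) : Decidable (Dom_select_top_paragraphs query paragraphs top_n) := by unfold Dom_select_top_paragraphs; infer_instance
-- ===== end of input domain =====

-- B replaces the per-paragraph set intersections with an inverted index (term -> paragraph indices)
-- plus a score array, then sorts indices with the same key; same cost, different data structure (alternative).

-- B replaces A's per-paragraph set intersections with an inverted index (term -> posting list of
-- paragraph indices) plus a score array, then sorts paragraph indices with the same key; return value only, alternative algorithm of similar cost.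

-- ===== PORT A =====
def select_top_paragraphs (query : String) (paragraphs : List String) (top_n : Int) : List String :=
  let query_terms := PySem.Set.ofList (PySem.Str.split₀ (PySem.Str.lower query))
  let scored := paragraphs.foldl (fun acc para =>
      let para_terms := PySem.Set.ofList (PySem.Str.split₀ (PySem.Str.lower para))
      let score : Int := ((PySem.Set.inter query_terms para_terms).length : Int)
      acc ++ [(score, para)]) ([] : List (Int × String))
  let sortedL := PySem.List.sorted2 scored (fun x => -x.1) (fun x => -(PySem.Str.len x.2)) false
  (PySem.List.slice sortedL none (some top_n)).map (fun x => x.2)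

-- ===== PORT B =====
def select_top_paragraphs_alt (query : String) (paragraphs : List String) (top_n : Int) : List String :=
  -- inverted index: term -> posting list of paragraph indices (setdefault+append = Dict.modify)
  let index := (PySem.List.enumerate paragraphs).foldl (fun d ip =>
      (PySem.Set.ofList (PySem.Str.split₀ (PySem.Str.lower ip.2))).foldl
        (fun d t => PySem.Dict.modify d t [] (fun l => l ++ [ip.1])) d)
      (PySem.Dict.empty : PySem.Dict String (List Int))
  let scores := (PySem.Set.ofList (PySem.Str.split₀ (PySem.Str.lower query))).foldl
      (fun sc t => (PySem.Dict.getD index t []).foldl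
        (fun sc i => PySem.List.pySetD sc i (PySem.List.pyGetD sc i 0 + 1)) sc)
      (List.replicate paragraphs.length (0 : Int))
  -- i is drawn from range(len(paragraphs)), so scores[i] / paragraphs[i] never raise: pyGetD is exact here
  let order := PySem.List.sorted2 (PySem.List.pyRange 0 (paragraphs.length : Int) 1)
      (fun i => -(PySem.List.pyGetD scores i 0))
      (fun i => -(PySem.Str.len (PySem.List.pyGetD paragraphs i ""))) false
  (PySem.List.slice order none (some top_n)).map (fun i => PySem.List.pyGetD paragraphs i "")

-- ===== PRECONDITION & SPEC =====
def Spec_select_top_paragraphs (query : String) (paragraphs : List String) (top_n : Int) (out : List String) : Prop := out = select_top_paragraphs_alt query paragraphs top_n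
instance (query : String) (paragraphs : List String) (top_n : Int) (out : List String) : Decidable (Spec_select_top_paragraphs query paragraphs top_n out) := by unfold Spec_select_top_paragraphs; infer_instance

-- ===== CLAIM (what is proved, stated in full; the proofs are below) =====
def Claim_equal_select_top_paragraphs : Prop := ∀ (query : String) (paragraphs : List String) (top_n : Int), Dom_select_top_paragraphs query paragraphs top_n → Spec_select_top_paragraphs query paragraphs top_n (select_top_paragraphs query paragraphs top_n)

-- ===== LEMMAS AND PROOFS =====

theorem pv_foldl_concat {α β : Type} (f : α → β) :
    ∀ (l : List α) (acc : List β), l.foldl (fun a x => a ++ [f x]) acc = acc ++ l.map f := by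
  intro l; induction l with
  | nil => simp
  | cons x t ih => intro acc; simp [List.foldl_cons, ih]

theorem pv_enumerate_eq :
    ∀ (l : List String) (s : Int),
    PySem.List.enumerate l s = (List.range l.length).map (fun (k : Nat) => (s + (k : Int), l.getD k "")) := by
  intro l; induction l with
  | nil => intro s; simp [PySem.List.enumerate]
  | cons x t ih =>
    intro s
    rw [show PySem.List.enumerate (x :: t) s = (s, x) :: PySem.List.enumerate t (s + 1) from rfl, ih]
    simp only [List.length_cons, List.range_succ_eq_map, List.map_cons, List.map_map]
    congr 1
    · simp
    · apply List.map_congr_left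
      intro k _
      simp [Function.comp]
      omega

theorem pv_pyRange_eq (n : Nat) :
    PySem.List.pyRange 0 (n : Int) 1 = (List.range n).map (fun (k : Nat) => ((k : Int))) := by
  unfold PySem.List.pyRange
  rcases Nat.eq_zero_or_pos n with h | h
  · subst h; simp
  · have h' : (0 : Int) < (n : Int) := by exact_mod_cast h
    simp only [if_neg (by norm_num : ¬ (1 : Int) = 0), if_pos (by norm_num : (0:Int) < 1), if_pos h']
    have hc : ((n : Int) - 0 + 1 - 1) / 1 = (n : Int) := by omega
    rw [hc, Int.toNat_natCast]
    apply List.map_congr_left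
    intro k _
    simp

theorem pv_insertBy_cons {α : Type} (b : α → α → Bool) (x y : α) (ys : List α) :
    PySem.List.insertBy b x (y :: ys) = if b x y then x :: y :: ys else y :: PySem.List.insertBy b x ys := rfl

theorem pv_insertBy_map {α β : Type} (g : α → β) (before : β → β → Bool) :
    ∀ (acc : List α) (x : α),
    PySem.List.insertBy before (g x) (acc.map g)
      = (PySem.List.insertBy (fun a b => before (g a) (g b)) x acc).map g := by
  intro acc; induction acc with
  | nil => intro x; rfl
  | cons a t ih =>
    intro x
    simp only [List.map_cons, pv_insertBy_cons]
    split_ifs with h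
    · simp
    · simp [ih]

theorem pv_sort_foldl_map {α β : Type} (g : α → β) (before : β → β → Bool) :
    ∀ (xs : List α) (acc : List α),
    (xs.map g).foldl (fun acc x => PySem.List.insertBy before x acc) (acc.map g)
      = (xs.foldl (fun acc x => PySem.List.insertBy (fun a b => before (g a) (g b)) x acc) acc).map g := by
  intro xs; induction xs with
  | nil => intro acc; simp
  | cons x t ih =>
    intro acc
    simp only [List.map_cons, List.foldl_cons]
    rw [pv_insertBy_map, ih]

theorem pv_insertBy_congr {α : Type} (before before' : α → α → Bool) (S : α → Prop)
    (h : ∀ a b, S a → S b → before a b = before' a b) :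
    ∀ (acc : List α) (x : α), S x → (∀ a ∈ acc, S a) →
    PySem.List.insertBy before x acc = PySem.List.insertBy before' x acc := by
  intro acc; induction acc with
  | nil => intro x _ _; rfl
  | cons a t ih =>
    intro x hx hacc
    simp only [pv_insertBy_cons]
    rw [h x a hx (hacc a (by simp)), ih x hx (fun a' ha' => hacc a' (by simp [ha']))]

theorem pv_sort_foldl_congr {α : Type} (before before' : α → α → Bool) (S : α → Prop)
    (h : ∀ a b, S a → S b → before a b = before' a b) :
    ∀ (xs : List α) (acc : List α), (∀ a ∈ xs, S a) → (∀ a ∈ acc, S a) →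
    xs.foldl (fun acc x => PySem.List.insertBy before x acc) acc
      = xs.foldl (fun acc x => PySem.List.insertBy before' x acc) acc := by
  intro xs; induction xs with
  | nil => intro acc _ _; rfl
  | cons x t ih =>
    intro acc hxs hacc
    simp only [List.foldl_cons]
    rw [pv_insertBy_congr before before' S h acc x (hxs x (by simp)) hacc]
    apply ih _ (fun a ha => hxs a (by simp [ha]))
    intro a ha
    rcases (PySem.List.mem_insertBy _ _ _ _).mp ha with h1 | h2
    · exact h1 ▸ hxs x (by simp)
    · exact hacc a h2

theorem pv_slice_to_map {α β : Type} (f : α → β) (xs : List α) (b : Int) :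
    PySem.List.slice (xs.map f) none (some b) = (PySem.List.slice xs none (some b)).map f := by
  simp only [PySem.List.slice, List.length_map]
  simp [List.map_take]

theorem pv_incr_foldl_len : ∀ (P : List Int) (sc : List Int),
    (P.foldl (fun sc i => PySem.List.pySetD sc i (PySem.List.pyGetD sc i 0 + 1)) sc).length = sc.length := by
  intro P; induction P with
  | nil => intro sc; rfl
  | cons p t ih => intro sc; simp [List.foldl_cons, ih, PySem.List.length_pySetD]

theorem pv_map_range {β : Type} :
    ∀ (l : List String) (f : String → β),
    (List.range l.length).map (fun k => f (l.getD k "")) = l.map f := by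
  intro l; induction l with
  | nil => intro f; simp
  | cons x t ih =>
    intro f
    simp only [List.length_cons, List.range_succ_eq_map, List.map_cons, List.map_map]
    congr 1
    rw [← ih f]
    apply List.map_congr_left
    intro k _
    simp [Function.comp]

def pvTerms (s : String) : List String := PySem.Set.ofList (PySem.Str.split₀ (PySem.Str.lower s))

theorem pv_inner_getD (i : Int) :
    ∀ (S : List String), S.Nodup → ∀ (d : PySem.Dict String (List Int)) (t : String),
    (S.foldl (fun d t' => PySem.Dict.modify d t' [] (fun l => l ++ [i])) d).getD t []
      = d.getD t [] ++ (if t ∈ S then [i] else []) := by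
  intro S; induction S with
  | nil => intro _ d t; simp
  | cons s S' ih =>
    intro hnd d t
    have hnd' := (List.nodup_cons.mp hnd).2
    have hns := (List.nodup_cons.mp hnd).1
    rw [List.foldl_cons, ih hnd']
    simp only [PySem.Dict.modify, PySem.Dict.getD_insert]
    by_cases hts : t = s
    · subst hts
      simp [hns]
    · simp [hts, List.mem_cons]

theorem pv_index_getD :
    ∀ (L : List (Int × String)) (d : PySem.Dict String (List Int)) (t : String),
    (L.foldl (fun d ip =>
        (PySem.Set.ofList (PySem.Str.split₀ (PySem.Str.lower ip.2))).foldl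
          (fun d t' => PySem.Dict.modify d t' [] (fun l => l ++ [ip.1])) d) d).getD t []
      = d.getD t [] ++ (L.filter (fun ip => decide (t ∈ pvTerms ip.2))).map Prod.fst := by
  intro L; induction L with
  | nil => intro d t; simp
  | cons ip L' ih =>
    intro d t
    rw [List.foldl_cons, ih, pv_inner_getD ip.1 _ (PySem.Set.nodup_ofList _) d t]
    by_cases h : t ∈ pvTerms ip.2
    · simp [pvTerms] at h
      simp [pvTerms, h]
    · simp [pvTerms] at h
      simp [pvTerms, h]

theorem pv_postings (paragraphs : List String) (t : String) :
    ((PySem.List.enumerate paragraphs).filter (fun ip => decide (t ∈ pvTerms ip.2))).map Prod.fst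
      = ((List.range paragraphs.length).filter (fun k => decide (t ∈ pvTerms (paragraphs.getD k "")))).map (fun (k : Nat) => ((k : Int))) := by
  rw [pv_enumerate_eq paragraphs 0]
  rw [List.filter_map]
  rw [List.map_map]
  simp only [Function.comp_def, zero_add]

theorem pv_incr_foldl (K : List Nat) :
    K.Nodup → ∀ (sc : List Int) (j : Nat), j < sc.length → (∀ k ∈ K, k < sc.length) →
    PySem.List.pyGetD ((K.map (fun (k : Nat) => ((k : Int)))).foldl
        (fun sc i => PySem.List.pySetD sc i (PySem.List.pyGetD sc i 0 + 1)) sc) (j : Int) 0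
      = PySem.List.pyGetD sc (j : Int) 0 + (if j ∈ K then 1 else 0) := by
  induction K with
  | nil => intro _ sc j _ _; simp
  | cons k K' ih =>
    intro hnd sc j hj hK
    have hnd' := (List.nodup_cons.mp hnd).2
    have hnk := (List.nodup_cons.mp hnd).1
    have hk : k < sc.length := hK k (by simp)
    simp only [List.map_cons, List.foldl_cons]
    rw [ih hnd' _ j (by rw [PySem.List.length_pySetD]; exact hj)
        (fun k' hk' => by rw [PySem.List.length_pySetD]; exact hK k' (by simp [hk']))]
    rw [PySem.List.pyGetD_pySetD_natCast sc k j _ _ hk]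
    by_cases hjk : j = k
    · subst hjk
      simp [hnk]
    · simp [hjk, List.mem_cons]

def pvScore (q p : String) : Int := ((PySem.Set.inter (pvTerms q) (pvTerms p)).length : Int)

def pvH (q : String) (ps : List String) (k : Nat) : Int × String := (pvScore q (ps.getD k ""), ps.getD k "")

def pvIndex (paragraphs : List String) : PySem.Dict String (List Int) :=
  (PySem.List.enumerate paragraphs).foldl (fun d ip =>
      (PySem.Set.ofList (PySem.Str.split₀ (PySem.Str.lower ip.2))).foldl
        (fun d t => PySem.Dict.modify d t [] (fun l => l ++ [ip.1])) d) PySem.Dict.empty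

def pvScores (query : String) (paragraphs : List String) : List Int :=
  (PySem.Set.ofList (PySem.Str.split₀ (PySem.Str.lower query))).foldl
      (fun sc t => (PySem.Dict.getD (pvIndex paragraphs) t []).foldl
        (fun sc i => PySem.List.pySetD sc i (PySem.List.pyGetD sc i 0 + 1)) sc)
      (List.replicate paragraphs.length (0 : Int))

theorem pv_postings_spec (paragraphs : List String) (t : String) :
    PySem.Dict.getD (pvIndex paragraphs) t []
      = ((List.range paragraphs.length).filter (fun k => decide (t ∈ pvTerms (paragraphs.getD k "")))).map (fun (k : Nat) => ((k : Int))) := by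
  unfold pvIndex
  rw [pv_index_getD]
  rw [pv_postings]
  simp

theorem pv_scores_foldl (paragraphs : List String) :
    ∀ (Q : List String) (sc : List Int), sc.length = paragraphs.length → ∀ (j : Nat), j < sc.length →
    PySem.List.pyGetD (Q.foldl (fun sc t => (PySem.Dict.getD (pvIndex paragraphs) t []).foldl
        (fun sc i => PySem.List.pySetD sc i (PySem.List.pyGetD sc i 0 + 1)) sc) sc) (j : Int) 0
      = PySem.List.pyGetD sc (j : Int) 0
        + ((Q.filter (fun t => decide (t ∈ pvTerms (paragraphs.getD j "")))).length : Int) := by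
  intro Q; induction Q with
  | nil => intro sc _ j _; simp
  | cons t Q' ih =>
    intro sc hlen j hj
    simp only [List.foldl_cons]
    rw [ih _ (by rw [pv_incr_foldl_len]; exact hlen) j (by rw [pv_incr_foldl_len]; exact hj)]
    rw [pv_postings_spec]
    rw [pv_incr_foldl _ (List.Nodup.filter _ List.nodup_range) sc j hj
        (fun k hk => by rw [hlen]; exact List.mem_range.mp (List.mem_filter.mp hk).1)]
    have hmem : (j ∈ (List.range paragraphs.length).filter
        (fun k => decide (t ∈ pvTerms (paragraphs.getD k "")))) ↔ t ∈ pvTerms (paragraphs.getD j "") := by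
      rw [List.mem_filter, List.mem_range]
      simp [hlen ▸ hj]
    by_cases hc : t ∈ pvTerms (paragraphs.getD j "")
    · rw [if_pos (hmem.mpr hc)]
      rw [List.filter_cons_of_pos (by simpa using hc)]
      simp only [List.length_cons]
      push_cast
      ring
    · rw [if_neg (fun h => hc (hmem.mp h))]
      rw [List.filter_cons_of_neg (by simpa using hc)]
      ring

theorem pv_scores_spec (q : String) (ps : List String) (j : Nat) (hj : j < ps.length) :
    PySem.List.pyGetD (pvScores q ps) (j : Int) 0 = pvScore q (ps.getD j "") := by
  unfold pvScores
  rw [pv_scores_foldl ps _ _ (by simp) j (by simpa using hj)]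
  rw [PySem.List.pyGetD_natCast]
  rw [List.getD_replicate]
  rw [zero_add]
  unfold pvScore PySem.Set.inter
  have h2 : (pvTerms q).filter (fun x => PySem.Set.contains (pvTerms (ps.getD j "")) x)
      = (pvTerms q).filter (fun t => decide (t ∈ pvTerms (ps.getD j ""))) := by
    apply List.filter_congr
    intro x _
    simp
  rw [h2]
  rfl
  exact hj

theorem pv_sort_map_nil {α β : Type} (g : α → β) (before : β → β → Bool) (xs : List α) :
    (xs.map g).foldl (fun acc x => PySem.List.insertBy before x acc) []
      = (xs.foldl (fun acc x => PySem.List.insertBy (fun a b => before (g a) (g b)) x acc) []).map g := by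
  have h := pv_sort_foldl_map g before xs []
  simpa using h

theorem pv_sorted2_eq {α : Type} (xs : List α) (k1 : α → Int) (k2 : α → Int) :
    PySem.List.sorted2 xs k1 k2 false
      = xs.foldl (fun acc x => PySem.List.insertBy
          (fun a b => decide (k1 a < k1 b) || (!decide (k1 b < k1 a) && decide (k2 a < k2 b))) x acc) [] := rfl

theorem pv_assemble (q : String) (ps : List String) (tn : Int) (scores : List Int)
    (hsc : ∀ j : Nat, j < ps.length → PySem.List.pyGetD scores (j : Int) 0 = pvScore q (ps.getD j "")) :
    (PySem.List.slice (PySem.List.sorted2 ((List.range ps.length).map (pvH q ps))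
        (fun x => -x.1) (fun x => -(PySem.Str.len x.2)) false) none (some tn)).map (fun x => x.2)
      = (PySem.List.slice (PySem.List.sorted2 ((List.range ps.length).map (fun (k : Nat) => ((k : Int))))
        (fun i => -(PySem.List.pyGetD scores i 0))
        (fun i => -(PySem.Str.len (PySem.List.pyGetD ps i ""))) false) none (some tn)).map
        (fun i => PySem.List.pyGetD ps i "") := by
  rw [pv_sorted2_eq, pv_sorted2_eq, pv_sort_map_nil, pv_sort_map_nil,
      pv_slice_to_map, pv_slice_to_map, List.map_map, List.map_map]
  have hS := pv_sort_foldl_congr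
      (fun (a b : Nat) => decide (-PySem.List.pyGetD scores (a : Int) 0 < -PySem.List.pyGetD scores (b : Int) 0) ||
        (!decide (-PySem.List.pyGetD scores (b : Int) 0 < -PySem.List.pyGetD scores (a : Int) 0) &&
          decide (-PySem.Str.len (PySem.List.pyGetD ps (a : Int) "") < -PySem.Str.len (PySem.List.pyGetD ps (b : Int) ""))))
      (fun (a b : Nat) => decide (-(pvH q ps a).1 < -(pvH q ps b).1) ||
        (!decide (-(pvH q ps b).1 < -(pvH q ps a).1) &&
          decide (-PySem.Str.len (pvH q ps a).2 < -PySem.Str.len (pvH q ps b).2)))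
      (fun k => k < ps.length)
      (fun a b ha hb => by
        simp only [hsc a ha, hsc b hb, PySem.List.pyGetD_natCast, pvH]
        rfl)
      (List.range ps.length) [] (by simp) (by simp)
  rw [hS]
  apply List.map_congr_left
  intro k _
  simp [Function.comp, pvH, PySem.List.pyGetD_natCast]

theorem pv_main (query : String) (paragraphs : List String) (top_n : Int) :
    select_top_paragraphs query paragraphs top_n = select_top_paragraphs_alt query paragraphs top_n := by
  have hB : select_top_paragraphs_alt query paragraphs top_n =
      (PySem.List.slice (PySem.List.sorted2 (PySem.List.pyRange 0 (paragraphs.length : Int) 1)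
        (fun i => -(PySem.List.pyGetD (pvScores query paragraphs) i 0))
        (fun i => -(PySem.Str.len (PySem.List.pyGetD paragraphs i ""))) false) none (some top_n)).map
        (fun i => PySem.List.pyGetD paragraphs i "") := rfl
  have hA : select_top_paragraphs query paragraphs top_n =
      (PySem.List.slice (PySem.List.sorted2
        (paragraphs.foldl (fun acc para =>
            acc ++ [(((PySem.Set.inter (PySem.Set.ofList (PySem.Str.split₀ (PySem.Str.lower query)))
                (PySem.Set.ofList (PySem.Str.split₀ (PySem.Str.lower para)))).length : Int), para)])
          ([] : List (Int × String)))
        (fun x => -x.1) (fun x => -(PySem.Str.len x.2)) false) none (some top_n)).map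
        (fun x => x.2) := rfl
  rw [hA, hB]
  rw [pv_foldl_concat, List.nil_append, ← pv_map_range paragraphs, pv_pyRange_eq paragraphs.length]
  exact pv_assemble query paragraphs top_n (pvScores query paragraphs) (pv_scores_spec query paragraphs)

-- ===== VERDICT (by name: the statement is the Claim_ definition above) =====
theorem select_top_paragraphs_spec : Claim_equal_select_top_paragraphs := by
  intro query paragraphs top_n _
  unfold Spec_select_top_paragraphs
  exact pv_main query paragraphs top_n
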